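-- pv_equiv track=rewrite | github.com/rishavroy1264bitmesra/sample_code | feature_extractors/bestbuy_layout_feature_extractor_crf.py | mixed_title_and_non_title
-- ===== SOURCE A (Python) =====
-- def mixed_title_and_non_title(clean_text):
--     tokens = clean_text.split(' ')
--     title_status = False
--     non_title_status = False
--     for token in tokens:
--         if token.istitle() and not title_status:
--             title_status = True
--         if not token.istitle() and not non_title_status:
--             non_title_status = True
--     if title_status and non_title_status:
--         return 1
--     else:
--         return 0
-- ===== SOURCE B (Python) =====
-- def _differs_from(ref, toks):
--     if not toks:
--         return 0
--     if toks[0].istitle() != ref: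
--         return 1
--     return _differs_from(ref, toks[1:])
--
-- def mixed_title_and_non_title(clean_text):
--     tokens = clean_text.split(' ')
--     return _differs_from(tokens[0].istitle(), tokens[1:])
-- ===== Notes on version B (the rewrite author's own statement) =====
-- stated objective: alternative
-- what changed: Instead of scanning all tokens maintaining two accumulator flags, B takes the first token's istitle() value as a reference and recursively searches the remaining tokens for the first one whose istitle() differs, returning 1 at that point (early exit) and 0 if none differs.
import Mathlib
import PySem

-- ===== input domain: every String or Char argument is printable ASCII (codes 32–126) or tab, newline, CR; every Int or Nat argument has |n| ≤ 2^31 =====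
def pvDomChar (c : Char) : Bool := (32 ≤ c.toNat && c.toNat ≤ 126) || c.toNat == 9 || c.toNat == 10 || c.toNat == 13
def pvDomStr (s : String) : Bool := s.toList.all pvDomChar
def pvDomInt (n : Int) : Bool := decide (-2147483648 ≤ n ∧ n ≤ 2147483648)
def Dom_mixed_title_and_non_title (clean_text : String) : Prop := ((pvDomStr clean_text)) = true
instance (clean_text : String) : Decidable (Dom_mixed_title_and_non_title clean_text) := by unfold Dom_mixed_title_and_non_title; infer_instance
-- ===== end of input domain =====

-- B compares each later token's istitle() against the first token's, returning 1 at the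
-- first disagreement (recursive early exit), instead of A's two-flag full scan (objective: alternative).

-- ===== PORT A =====
-- hand port of str.istitle(): exact on the ASCII domain (cased characters = ASCII letters)
def pyIstitleGo (prevCased cased : Bool) : List Char → Bool
  | [] => cased
  | c :: rest =>
    if PySem.Chars.isupper c then
      if prevCased then false else pyIstitleGo true true rest
    else if PySem.Chars.islower c then
      if prevCased then pyIstitleGo true true rest else false
    else pyIstitleGo false cased rest

def pyIstitle (s : String) : Bool := pyIstitleGo false false s.toList

def mixed_title_and_non_title (clean_text : String) : Int :=
  -- clean_text.split(' '): sep is the nonempty " ", so split? is always `some`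
  let tokens := (PySem.Str.split? clean_text " ").getD []
  let st := tokens.foldl (fun (st : Bool × Bool) token =>
    (if pyIstitle token && !st.1 then true else st.1,
     if !(pyIstitle token) && !st.2 then true else st.2)) (false, false)
  if st.1 && st.2 then 1 else 0

-- ===== PORT B =====
-- recursive search for the first token whose istitle() differs from the reference
def mixedDiffersFrom (ref : Bool) : List String → Int
  | [] => 0
  | t :: rest => if pyIstitle t != ref then 1 else mixedDiffersFrom ref rest

def mixed_title_and_non_title_alt (clean_text : String) : Int :=
  let tokens := (PySem.Str.split? clean_text " ").getD []
  -- tokens[0]: split(' ') always yields at least one token, so the [] case is unreachable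
  match tokens with
  | [] => 0
  | t0 :: rest => mixedDiffersFrom (pyIstitle t0) rest

-- ===== PRECONDITION & SPEC =====
def Spec_mixed_title_and_non_title (clean_text : String) (out : Int) : Prop := out = mixed_title_and_non_title_alt clean_text
instance (clean_text : String) (out : Int) : Decidable (Spec_mixed_title_and_non_title clean_text out) := by unfold Spec_mixed_title_and_non_title; infer_instance

-- ===== CLAIM =====
def Claim_equal_mixed_title_and_non_title : Prop := ∀ (clean_text : String), Dom_mixed_title_and_non_title clean_text → Spec_mixed_title_and_non_title clean_text (mixed_title_and_non_title clean_text)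

-- ===== LEMMAS AND PROOFS =====

-- A's flag-accumulating loop computes (any istitle-token, any non-istitle-token)
theorem foldl_flags (l : List Bool) (a b : Bool) :
    l.foldl (fun (st : Bool × Bool) t =>
      (if t && !st.1 then true else st.1, if !t && !st.2 then true else st.2)) (a, b)
    = (a || l.any id, b || l.any (fun t => !t)) := by
  induction l generalizing a b with
  | nil => simp
  | cons h tl ih =>
    simp only [List.foldl_cons, List.any_cons, ih]
    cases h <;> cases a <;> cases b <;> simp

-- B's recursion returns 1 iff some token's istitle differs from the reference
theorem differs_any (ref : Bool) (l : List String) :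
    mixedDiffersFrom ref l = if l.any (fun t => pyIstitle t != ref) then 1 else 0 := by
  induction l with
  | nil => simp [mixedDiffersFrom]
  | cons t rest ih =>
    simp only [mixedDiffersFrom, List.any_cons, ih]
    by_cases h : (pyIstitle t != ref) = true <;> simp [h]

-- both values occur among b0 :: bs iff some element of bs differs from b0
theorem mix_eq_differs (b0 : Bool) (bs : List Bool) :
    ((b0 || bs.any id) && ((!b0) || bs.any (fun t => !t))) = bs.any (fun t => t != b0) := by
  induction bs with
  | nil => cases b0 <;> simp
  | cons h tl ih =>
    cases h <;> cases b0 <;> simp_all [List.any_cons]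

theorem mixed_eq (clean_text : String) :
    mixed_title_and_non_title clean_text = mixed_title_and_non_title_alt clean_text := by
  unfold mixed_title_and_non_title mixed_title_and_non_title_alt
  cases htok : (PySem.Str.split? clean_text " ").getD [] with
  | nil => simp
  | cons t0 rest =>
    have hf := foldl_flags ((t0 :: rest).map pyIstitle) false false
    simp only [List.foldl_map] at hf
    simp only [hf, differs_any, List.map_cons, List.any_cons, Bool.false_or, id]
    rw [mix_eq_differs (pyIstitle t0) (rest.map pyIstitle), List.any_map]
    rfl

-- ===== VERDICT =====
theorem mixed_title_and_non_title_spec : Claim_equal_mixed_title_and_non_title := by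
  intro s _
  unfold Spec_mixed_title_and_non_title
  exact mixed_eq s
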